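-- pv_equiv track=rewrite | github.com/S4LPICON/Programacion-en-Python | Ejercicios Fundamentos Ing sistemas/function.py | sumar_intervalo
-- ===== SOURCE A (Python) =====
-- def es_deficiente(n:int)->bool:
--     s = 0
--     k = 1
--     while(k<=n/2):
--         if ((n % k)== 0):
--             s = s + k
--         else:
--             pass
--         k = k+1
--     if (s<n):
--         rta = True
--     else:
--         rta = False
--     return rta
--
-- def sumar_intervalo(a,b):
--     s=0
--     k=a
--     while (k<=b):
--         if (es_deficiente(k)==True):
--             s=s+k
--         else:
--             pass
--         k+=1
--     return s
-- ===== SOURCE B (Python) =====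
-- def _suma_divisores_propios(n):
--     # sum of proper divisors via paired trial division up to sqrt(n)
--     s = 0
--     d = 1
--     while d * d <= n:
--         if n % d == 0:
--             if d != n:
--                 s += d
--             q = n // d
--             if q != d and q != n:
--                 s += q
--         d += 1
--     return s
--
-- def sumar_intervalo(a, b):
--     return sum(k for k in range(a, b + 1) if _suma_divisores_propios(k) < k)
-- ===== Notes on version B (the rewrite author's own statement) =====
-- stated objective: faster
-- what changed: Replaces A's per-number O(n) trial division over all k ≤ n/2 by a paired divisor scan up to √n (each small divisor d also contributes its cofactor n//d), so the deficiency test is O(√n) per number instead of O(n).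
import Mathlib
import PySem

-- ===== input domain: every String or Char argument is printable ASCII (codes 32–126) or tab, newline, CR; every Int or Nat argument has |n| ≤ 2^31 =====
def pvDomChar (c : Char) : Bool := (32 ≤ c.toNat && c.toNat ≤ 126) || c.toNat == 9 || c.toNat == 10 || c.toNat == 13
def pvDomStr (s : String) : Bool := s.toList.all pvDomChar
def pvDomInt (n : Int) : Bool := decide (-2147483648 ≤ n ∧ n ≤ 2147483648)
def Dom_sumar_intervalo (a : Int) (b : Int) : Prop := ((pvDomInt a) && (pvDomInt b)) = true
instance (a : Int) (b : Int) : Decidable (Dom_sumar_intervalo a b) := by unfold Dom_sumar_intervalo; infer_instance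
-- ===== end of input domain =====

-- B replaces A's per-number trial division over all k ≤ n/2 by a paired divisor
-- scan up to √n (each small divisor d also contributes its cofactor n//d): faster.
-- Both while-loops are ported with an explicit fuel argument that strictly bounds
-- the iteration count (a totality guard only; the loop always exits via its own test).

-- ===== PORT A =====
-- while k <= n/2: Python compares k against the float n/2; for |n| ≤ 2^31 both values
-- are exactly representable, so the comparison is exactly the integer test 2*k ≤ n.
def esDefLoop (n : Int) : Nat → Int → Int → Int
  | 0, _, s => s
  | fuel+1, k, s =>
    if 2*k ≤ n then
      esDefLoop n fuel (k+1) (if PySem.Int.mod n k = 0 then s + k else s)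
    else s

def es_deficiente (n : Int) : Bool := decide (esDefLoop n n.toNat 1 0 < n)

def sumarLoop (b : Int) : Nat → Int → Int → Int
  | 0, _, s => s
  | fuel+1, k, s =>
    if k ≤ b then
      sumarLoop b fuel (k+1) (if es_deficiente k = true then s + k else s)
    else s

def sumar_intervalo (a : Int) (b : Int) : Int := sumarLoop b (b + 1 - a).toNat a 0

-- ===== PORT B =====
def pdsLoop (n : Int) : Nat → Int → Int → Int
  | 0, _, s => s
  | fuel+1, d, s =>
    if d * d ≤ n then
      pdsLoop n fuel (d+1)
        (if PySem.Int.mod n d = 0 then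
          (let s1 := if d ≠ n then s + d else s
           let q := PySem.Int.floordiv n d
           if q ≠ d ∧ q ≠ n then s1 + q else s1)
         else s)
    else s

def suma_divisores_propios (n : Int) : Int := pdsLoop n n.toNat 1 0

def sumar_intervalo_alt (a : Int) (b : Int) : Int :=
  (PySem.List.pyRange a (b+1) 1).foldl
    (fun s k => if suma_divisores_propios k < k then s + k else s) 0

-- ===== PRECONDITION & SPEC =====
def Spec_sumar_intervalo (a : Int) (b : Int) (out : Int) : Prop := out = sumar_intervalo_alt a b
instance (a : Int) (b : Int) (out : Int) : Decidable (Spec_sumar_intervalo a b out) := by unfold Spec_sumar_intervalo; infer_instance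

-- ===== CLAIM (what is proved, stated in full; the proofs are below) =====
def Claim_equal_sumar_intervalo : Prop := ∀ (a : Int) (b : Int), Dom_sumar_intervalo a b → Spec_sumar_intervalo a b (sumar_intervalo a b)

-- ===== LEMMAS AND PROOFS =====

-- A's inner loop sums the divisors j of N with k ≤ j ≤ N/2.
theorem esDefLoop_char (N : ℕ) :
    ∀ (fuel k : ℕ) (s : Int), 1 ≤ k → N + 1 - 2*k ≤ fuel →
      esDefLoop (N : Int) fuel (k : Int) s
        = s + ((∑ j ∈ Finset.Ico k (N/2 + 1), if j ∣ N then j else 0 : ℕ) : Int) := by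
  intro fuel
  induction fuel with
  | zero =>
    intro k s hk hm
    rw [Finset.Ico_eq_empty (by omega), Finset.sum_empty]
    simp [esDefLoop]
  | succ m ih =>
    intro k s hk hm
    simp only [esDefLoop]
    by_cases hcond : 2*k ≤ N
    · rw [if_pos (by exact_mod_cast hcond)]
      have hstep : ((k : Int) + 1) = ((k + 1 : ℕ) : Int) := by push_cast; ring
      rw [hstep, ih (k+1) _ (by omega) (by omega)]
      rw [Finset.sum_eq_sum_Ico_succ_bot (by omega : k < N/2 + 1)]
      have hmod : (PySem.Int.mod (N : Int) (k : Int) = 0) ↔ (k ∣ N) := by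
        rw [PySem.Int.mod_eq_zero_iff_dvd, Int.natCast_dvd_natCast]
      by_cases hdv : k ∣ N
      · rw [if_pos (hmod.mpr hdv), if_pos hdv]; push_cast; ring
      · rw [if_neg (fun hc => hdv (hmod.mp hc)), if_neg hdv]; push_cast; ring
    · rw [if_neg (by exact_mod_cast hcond), Finset.Ico_eq_empty (by omega), Finset.sum_empty]
      simp

-- B's inner loop computes the paired-divisor sum over the divisors j of N with d ≤ j ≤ √N.
theorem pdsLoop_char (N : ℕ) :
    ∀ (fuel d : ℕ) (s : Int), 1 ≤ d → N + 1 - d ≤ fuel →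
      pdsLoop (N : Int) fuel (d : Int) s
        = s + ((∑ j ∈ Finset.Ico d (Nat.sqrt N + 1),
            if j ∣ N then
              ((if j ≠ N then j else 0)
                + (if N/j ≠ j ∧ N/j ≠ N then N/j else 0))
            else 0 : ℕ) : Int) := by
  intro fuel
  induction fuel with
  | zero =>
    intro d s hd hm
    rw [Finset.Ico_eq_empty (by have := Nat.sqrt_le_self N; omega), Finset.sum_empty]
    simp [pdsLoop]
  | succ m ih =>
    intro d s hd hm
    simp only [pdsLoop]
    by_cases hcond : d * d ≤ N
    · rw [if_pos (by exact_mod_cast hcond)]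
      have hstep : ((d : Int) + 1) = ((d + 1 : ℕ) : Int) := by push_cast; ring
      rw [hstep, ih (d+1) _ (by omega) (by omega)]
      have hlt : d < Nat.sqrt N + 1 := Nat.lt_succ_of_le (Nat.le_sqrt.mpr hcond)
      rw [Finset.sum_eq_sum_Ico_succ_bot hlt]
      have hmod : (PySem.Int.mod (N : Int) (d : Int) = 0) ↔ (d ∣ N) := by
        rw [PySem.Int.mod_eq_zero_iff_dvd, Int.natCast_dvd_natCast]
      by_cases hdv : d ∣ N
      · rw [if_pos (hmod.mpr hdv), if_pos hdv]
        rw [PySem.Int.floordiv_natCast]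
        have hdn : ((d : Int) ≠ (N : Int)) ↔ (d ≠ N) := by
          constructor <;> (intro h1 h2; exact h1 (by exact_mod_cast h2))
        have hqd : (((N/d : ℕ) : Int) ≠ (d : Int) ∧ ((N/d : ℕ) : Int) ≠ (N : Int))
            ↔ (N/d ≠ d ∧ N/d ≠ N) := by
          constructor <;>
            (rintro ⟨h1, h2⟩;
             exact ⟨fun hc => h1 (by exact_mod_cast hc), fun hc => h2 (by exact_mod_cast hc)⟩)
        by_cases h1 : d ≠ N <;> by_cases h2 : N/d ≠ d ∧ N/d ≠ N
        · rw [if_pos (hdn.mpr h1), if_pos (hqd.mpr h2), if_pos h1, if_pos h2]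
          push_cast; ring
        · rw [if_pos (hdn.mpr h1), if_neg (fun hc => h2 (hqd.mp hc)), if_pos h1, if_neg h2]
          push_cast; ring
        · rw [if_neg (fun hc => h1 (hdn.mp hc)), if_pos (hqd.mpr h2), if_neg h1, if_pos h2]
          push_cast; ring
        · rw [if_neg (fun hc => h1 (hdn.mp hc)), if_neg (fun hc => h2 (hqd.mp hc)),
            if_neg h1, if_neg h2]
          push_cast; ring
      · rw [if_neg (fun hc => hdv (hmod.mp hc)), if_neg hdv]; push_cast; ring
    · have hsq : Nat.sqrt N < d := by
        by_contra hc
        exact hcond (Nat.le_sqrt.mp (Nat.le_of_not_lt hc))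
      rw [if_neg (by exact_mod_cast hcond), Finset.Ico_eq_empty (by omega), Finset.sum_empty]
      simp

-- A's divisor range 1..N/2 is exactly the proper divisors of N.
theorem sumA_nat (N : ℕ) (h : 1 ≤ N) :
    (∑ j ∈ Finset.Ico 1 (N/2 + 1), if j ∣ N then j else 0)
      = ∑ d ∈ N.properDivisors, d := by
  rw [← Finset.sum_filter]
  congr 1
  ext j
  simp only [Finset.mem_filter, Finset.mem_Ico, Nat.mem_properDivisors]
  constructor
  · rintro ⟨⟨h1, h2⟩, hdv⟩
    exact ⟨hdv, by omega⟩
  · rintro ⟨hdv, hlt⟩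
    have hj : 0 < j := Nat.pos_of_dvd_of_pos hdv (by omega)
    obtain ⟨c, hc⟩ := hdv
    have hc2 : 2 ≤ c := by
      by_contra hno
      interval_cases c <;> omega
    have hj2 : j * 2 ≤ N := by rw [hc]; exact Nat.mul_le_mul (le_refl j) hc2
    exact ⟨⟨hj, by omega⟩, ⟨c, hc⟩⟩

-- B's paired scan over divisors ≤ √N also sums exactly the proper divisors of N.
theorem sumB_nat (N : ℕ) (h : 1 ≤ N) :
    (∑ j ∈ Finset.Ico 1 (Nat.sqrt N + 1),
        if j ∣ N then
          ((if j ≠ N then j else 0) + (if N/j ≠ j ∧ N/j ≠ N then N/j else 0))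
        else 0)
      = ∑ d ∈ N.properDivisors, d := by
  have hN0 : N ≠ 0 := by omega
  rw [← Finset.sum_filter, Finset.sum_add_distrib, ← Finset.sum_filter, ← Finset.sum_filter]
  have hsmall : (((Finset.Ico 1 (Nat.sqrt N + 1)).filter (fun j => j ∣ N)).filter (fun j => j ≠ N))
      = N.properDivisors.filter (fun d => d * d ≤ N) := by
    ext j
    simp only [Finset.mem_filter, Finset.mem_Ico, Nat.mem_properDivisors]
    constructor
    · rintro ⟨⟨⟨h1, h2⟩, hdv⟩, hne⟩
      exact ⟨⟨hdv, Nat.lt_of_le_of_ne (Nat.le_of_dvd (by omega) hdv) hne⟩,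
        Nat.le_sqrt.mp (by omega)⟩
    · rintro ⟨⟨hdv, hlt⟩, hsq⟩
      have h1 : 0 < j := Nat.pos_of_dvd_of_pos hdv (by omega)
      exact ⟨⟨⟨h1, by have := Nat.le_sqrt.mpr hsq; omega⟩, hdv⟩, by omega⟩
  have hlarge :
      (∑ j ∈ ((Finset.Ico 1 (Nat.sqrt N + 1)).filter (fun j => j ∣ N)).filter
          (fun j => N / j ≠ j ∧ N / j ≠ N), N / j)
        = ∑ d ∈ N.properDivisors.filter (fun d => ¬ d * d ≤ N), d := by
    refine Finset.sum_nbij' (fun j => N / j) (fun e => N / e) ?_ ?_ ?_ ?_ ?_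
    · intro j hj
      simp only [Finset.mem_filter, Finset.mem_Ico, Nat.mem_properDivisors] at hj ⊢
      obtain ⟨⟨⟨hj1, hj2⟩, hdv⟩, hne1, hne2⟩ := hj
      have hsq : j * j ≤ N := Nat.le_sqrt.mp (by omega)
      have hcdvd : N / j ∣ N := Nat.div_dvd_of_dvd hdv
      have hmul : j * (N / j) = N := Nat.mul_div_cancel' hdv
      have hjle : j ≤ N / j := by nlinarith
      have hjlt : j < N / j := Nat.lt_of_le_of_ne hjle (fun hc => hne1 hc.symm)
      refine ⟨⟨hcdvd, Nat.lt_of_le_of_ne (Nat.le_of_dvd (by omega) hcdvd) hne2⟩, ?_⟩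
      intro hc
      nlinarith
    · intro e he
      simp only [Finset.mem_filter, Finset.mem_Ico, Nat.mem_properDivisors] at he ⊢
      obtain ⟨⟨hdv, hlt⟩, hbig⟩ := he
      have he1 : 0 < e := Nat.pos_of_dvd_of_pos hdv (by omega)
      have hcdvd : N / e ∣ N := Nat.div_dvd_of_dvd hdv
      have hmul : e * (N / e) = N := Nat.mul_div_cancel' hdv
      have hc1 : 0 < N / e := Nat.pos_of_dvd_of_pos hcdvd (by omega)
      have hclt : N / e < e := by nlinarith
      have hback : N / (N / e) = e := Nat.div_div_self hdv hN0
      refine ⟨⟨⟨hc1, ?_⟩, hcdvd⟩, ?_, ?_⟩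
      · have hsq : (N / e) * (N / e) ≤ N := by nlinarith
        have := Nat.le_sqrt.mpr hsq
        omega
      · rw [hback]; omega
      · rw [hback]; omega
    · intro j hj
      simp only [Finset.mem_filter, Finset.mem_Ico] at hj
      exact Nat.div_div_self hj.1.2 hN0
    · intro e he
      simp only [Finset.mem_filter, Nat.mem_properDivisors] at he
      exact Nat.div_div_self he.1.1 hN0
    · intro j _; rfl
  rw [hsmall, hlarge, Finset.sum_filter_add_sum_filter_not]

-- the two deficiency tests agree on every integer
theorem pointwise (n : Int) : es_deficiente n = decide (suma_divisores_propios n < n) := by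
  unfold es_deficiente suma_divisores_propios
  rcases (by omega : n ≤ 0 ∨ 0 < n) with hn | hn
  · rw [show n.toNat = 0 from by omega]
    rfl
  · obtain ⟨N, rfl⟩ : ∃ N : ℕ, n = (N : Int) := ⟨n.toNat, (Int.toNat_of_nonneg (by omega)).symm⟩
    have hN : 1 ≤ N := by exact_mod_cast hn
    have h1 := esDefLoop_char N N 1 0 le_rfl (by omega)
    have h2 := pdsLoop_char N N 1 0 le_rfl (by omega)
    rw [Nat.cast_one] at h1 h2
    rw [Int.toNat_natCast, h1, h2, sumA_nat N hN, sumB_nat N hN]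

theorem outer (b : Int) :
    ∀ (fuel : ℕ) (k s : Int), (b + 1 - k).toNat ≤ fuel →
      sumarLoop b fuel k s
        = (PySem.List.pyRange k (b+1) 1).foldl
            (fun s k => if suma_divisores_propios k < k then s + k else s) s := by
  intro fuel
  induction fuel with
  | zero =>
    intro k s hm
    rw [PySem.List.pyRange_one_eq_nil (by omega), List.foldl_nil]
    rfl
  | succ m ih =>
    intro k s hm
    simp only [sumarLoop]
    by_cases hk : k ≤ b
    · rw [if_pos hk, PySem.List.pyRange_one_cons (by omega), List.foldl_cons]
      have hpt : (if es_deficiente k = true then s + k else s)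
          = (if suma_divisores_propios k < k then s + k else s) := by
        rw [pointwise k]
        by_cases hc : suma_divisores_propios k < k
        · rw [if_pos (by simpa using hc), if_pos hc]
        · rw [if_neg (by simpa using hc), if_neg hc]
      rw [hpt]
      exact ih (k+1) _ (by omega)
    · rw [if_neg hk, PySem.List.pyRange_one_eq_nil (by omega), List.foldl_nil]

-- ===== VERDICT (by name: the statement is the Claim_ definition above) =====
theorem sumar_intervalo_spec : Claim_equal_sumar_intervalo := by
  intro a b _
  unfold Spec_sumar_intervalo sumar_intervalo sumar_intervalo_alt
  exact outer b (b + 1 - a).toNat a 0 le_rfl
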